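-- pv_equiv track=rewrite | github.com/HaowenLee/PokerRemnants | poker_remnants.py | create_straight
-- ===== SOURCE A (Python) =====
-- def create_straight(list_of_nums, min_length):
--     a = sorted(list_of_nums)
--     lens = len(a)
--     for begin in range(0, lens):
--         for end in range(begin, lens):
--             if a[end] - a[begin] != end - begin:
--                 break
--             elif end - begin >= min_length - 1:
--                 yield list(range(a[begin], a[end] + 1))
-- ===== SOURCE B (Python) =====
-- def create_straight(list_of_nums, min_length):
--     a = sorted(list_of_nums)
--     # one pass: partition the sorted list into maximal consecutive (+1) runs
--     runs = []
--     cur = []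
--     for x in a:
--         if cur and x == cur[-1] + 1:
--             cur.append(x)
--         else:
--             if cur:
--                 runs.append(cur)
--             cur = [x]
--     if cur:
--         runs.append(cur)
--     # enumerate qualifying sub-ranges of each run
--     for v in runs:
--         L = len(v)
--         for i in range(L):
--             for j in range(i + max(min_length - 1, 0), L):
--                 yield list(range(v[i], v[j] + 1))
-- ===== Notes on version B (the rewrite author's own statement) =====
-- stated objective: alternative
-- what changed: Instead of re-scanning the consecutive chain from every start index with a break, B first partitions the sorted list in one pass into maximal +1-runs and then enumerates the qualifying sub-ranges of each run by index arithmetic (j starts at i+max(min_length-1,0), so no per-element break test).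
import Mathlib
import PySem

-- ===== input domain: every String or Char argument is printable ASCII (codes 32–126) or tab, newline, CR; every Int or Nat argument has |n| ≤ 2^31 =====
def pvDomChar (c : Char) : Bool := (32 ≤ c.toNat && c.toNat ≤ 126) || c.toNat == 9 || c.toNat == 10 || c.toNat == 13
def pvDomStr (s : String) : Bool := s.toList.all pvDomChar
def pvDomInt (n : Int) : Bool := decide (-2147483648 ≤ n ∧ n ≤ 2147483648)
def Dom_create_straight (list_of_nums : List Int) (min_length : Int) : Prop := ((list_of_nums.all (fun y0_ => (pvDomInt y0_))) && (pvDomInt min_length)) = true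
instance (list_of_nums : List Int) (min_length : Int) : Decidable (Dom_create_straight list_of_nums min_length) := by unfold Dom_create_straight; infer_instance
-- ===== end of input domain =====

-- B partitions the sorted list once into maximal +1-runs and enumerates each run's
-- qualifying sub-ranges by index arithmetic, instead of A's re-scan-with-break from
-- every start index (alternative decomposition; return value only, A is a generator).


-- ===== PORT A =====
-- inner 'for end in range(begin, lens)' loop with its break; fuel = lens - e
def csInner (a : List Int) (b : Nat) (minl : Int) : Nat → Nat → List (List Int)
  | _, 0 => []
  | e, fuel+1 =>
    if a.getD e 0 - a.getD b 0 ≠ (e : Int) - (b : Int) then []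
    else
      (if (e : Int) - (b : Int) ≥ minl - 1 then
         [PySem.List.pyRange (a.getD b 0) (a.getD e 0 + 1) 1] else [])
      ++ csInner a b minl (e+1) fuel

def create_straight (list_of_nums : List Int) (min_length : Int) : List (List Int) :=
  let a := PySem.List.sorted list_of_nums (fun x => x) false
  let lens := a.length
  (List.range lens).foldl (fun acc b => acc ++ csInner a b min_length b (lens - b)) []

-- ===== PORT B =====
-- one-pass partition of the sorted list into maximal +1-runs (cur kept reversed)
def csRunsGo : List Int → Int → List Int → List (List Int)
  | [], _, cur => [cur.reverse]
  | y :: ys, prev, cur =>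
    if y = prev + 1 then csRunsGo ys y (y :: cur)
    else cur.reverse :: csRunsGo ys y [y]

def csRuns : List Int → List (List Int)
  | [] => []
  | x :: xs => csRunsGo xs x [x]

-- 'for i in range(L): for j in range(i + max(min_length-1,0), L): yield …'
def csEmit (v : List Int) (minl : Int) : List (List Int) :=
  (List.range v.length).flatMap (fun i =>
    ((List.range v.length).drop (i + (minl - 1).toNat)).map
      (fun j => PySem.List.pyRange (v.getD i 0) (v.getD j 0 + 1) 1))

def create_straight_alt (list_of_nums : List Int) (min_length : Int) : List (List Int) :=
  (csRuns (PySem.List.sorted list_of_nums (fun x => x) false)).flatMap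
    (fun v => csEmit v min_length)

-- ===== PRECONDITION & SPEC =====
def Spec_create_straight (list_of_nums : List Int) (min_length : Int) (out : List (List Int)) : Prop := out = create_straight_alt list_of_nums min_length
instance (list_of_nums : List Int) (min_length : Int) (out : List (List Int)) : Decidable (Spec_create_straight list_of_nums min_length out) := by unfold Spec_create_straight; infer_instance

-- ===== CLAIM (what is proved, stated in full; the proofs are below) =====
def Claim_equal_create_straight : Prop := ∀ (list_of_nums : List Int) (min_length : Int), Dom_create_straight list_of_nums min_length → Spec_create_straight list_of_nums min_length (create_straight list_of_nums min_length)

-- ===== LEMMAS AND PROOFS =====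

-- first-run decomposition helpers (proof-only)
def csTake : Int → List Int → List Int
  | _, [] => []
  | p, y :: ys => if y = p + 1 then y :: csTake y ys else []

def csDrop : Int → List Int → List Int
  | _, [] => []
  | p, y :: ys => if y = p + 1 then csDrop y ys else y :: ys

theorem csTake_append_csDrop (xs : List Int) : ∀ p, csTake p xs ++ csDrop p xs = xs := by
  induction xs with
  | nil => intro p; rfl
  | cons y ys ih =>
    intro p
    simp only [csTake, csDrop]
    split_ifs with h
    · simpa using ih y
    · simp

theorem csDrop_length_le (xs : List Int) : ∀ p, (csDrop p xs).length ≤ xs.length := by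
  induction xs with
  | nil => intro p; simp [csDrop]
  | cons y ys ih =>
    intro p
    simp only [csDrop]
    split_ifs with h
    · exact le_trans (ih y) (by simp)
    · simp

theorem csRunsGo_eq (xs : List Int) : ∀ p cur,
    csRunsGo xs p cur = (cur.reverse ++ csTake p xs) :: csRuns (csDrop p xs) := by
  induction xs with
  | nil => intro p cur; simp [csRunsGo, csTake, csDrop, csRuns]
  | cons y ys ih =>
    intro p cur
    simp only [csRunsGo, csTake, csDrop]
    split_ifs with h
    · rw [ih y (y :: cur)]; simp
    · simp [csRuns]

theorem csRuns_cons (x : Int) (xs : List Int) :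
    csRuns (x :: xs) = (x :: csTake x xs) :: csRuns (csDrop x xs) := by
  show csRunsGo xs x [x] = _
  rw [csRunsGo_eq]
  simp

theorem csTake_getD (xs : List Int) : ∀ p k, k < (csTake p xs).length →
    (csTake p xs).getD k 0 = p + 1 + k := by
  induction xs with
  | nil => intro p k h; simp [csTake] at h
  | cons y ys ih =>
    intro p k h
    simp only [csTake] at h ⊢
    split_ifs at h ⊢ with hy
    · subst hy
      cases k with
      | zero => simp
      | succ k =>
        simp only [List.getD_cons_succ]
        rw [ih (p+1) k (by simp at h; omega)]
        push_cast; ring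
    · simp at h

theorem csDrop_head_ne (xs : List Int) : ∀ p, csDrop p xs ≠ [] →
    (csDrop p xs).getD 0 0 ≠ p + (csTake p xs).length + 1 := by
  induction xs with
  | nil => intro p h; simp [csDrop] at h
  | cons y ys ih =>
    intro p h
    simp only [csDrop, csTake] at h ⊢
    split_ifs at h ⊢ with hy
    · subst hy
      have := ih (p+1) h
      intro hc
      apply this
      rw [hc, List.length_cons]
      push_cast; ring
    · simp only [List.getD_cons_zero, List.length_nil, Nat.cast_zero]
      omega

-- shift: A's inner loop, started past the first run, only sees the tail
theorem csInner_shift (v r : List Int) (minl : Int) :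
    ∀ fuel (b' e' : Nat),
      csInner (v ++ r) (v.length + b') minl (v.length + e') fuel
        = csInner r b' minl e' fuel := by
  intro fuel
  induction fuel with
  | zero => intro b' e'; rfl
  | succ fuel ih =>
    intro b' e'
    simp only [csInner]
    have hg : ∀ k : Nat, (v ++ r).getD (v.length + k) 0 = r.getD k 0 := by
      intro k
      rcases lt_or_ge k r.length with hk | hk
      · rw [List.getD_eq_getElem?_getD, List.getElem?_append_right (by omega),
          List.getD_eq_getElem?_getD, Nat.add_sub_cancel_left]
      · have h1 : (v ++ r).length ≤ v.length + k := by simp; omega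
        rw [List.getD_eq_getElem?_getD, List.getD_eq_getElem?_getD,
          List.getElem?_eq_none h1, List.getElem?_eq_none hk]
    have hc : ((v.length + e' : Nat) : Int) - ((v.length + b' : Nat) : Int)
        = (e' : Int) - (b' : Int) := by push_cast; ring
    rw [hg, hg, hc]
    split_ifs with h1 h2
    · rfl
    · rw [show v.length + e' + 1 = v.length + (e' + 1) by omega, ih]
    · rw [show v.length + e' + 1 = v.length + (e' + 1) by omega, ih]

-- within the first run: A's inner loop yields exactly B's row enumeration
theorem csInner_run (v r : List Int) (x : Int) (minl : Int)
    (Hv : ∀ k, k < v.length → v.getD k 0 = x + k)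
    (Hb : r ≠ [] → r.getD 0 0 ≠ x + v.length)
    (i : Nat) (hi : i < v.length) :
    ∀ (n e : Nat), i ≤ e → e ≤ v.length → v.length - e ≤ n →
      csInner (v ++ r) i minl e ((v ++ r).length - e)
        = ((List.range v.length).drop (max e (i + (minl - 1).toNat))).map
            (fun (j : Nat) => PySem.List.pyRange (x + i) (x + (j : Int) + 1) 1) := by
  have hga : ∀ k, k < v.length → (v ++ r).getD k 0 = x + k := by
    intro k hk
    rw [List.getD_eq_getElem?_getD, List.getElem?_append_left hk,
      ← List.getD_eq_getElem?_getD]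
    exact Hv k hk
  have hgr : (v ++ r).getD v.length 0 = r.getD 0 0 := by
    rw [List.getD_eq_getElem?_getD, List.getD_eq_getElem?_getD,
      List.getElem?_append_right (le_refl _), Nat.sub_self]
  have hend : csInner (v ++ r) i minl v.length ((v ++ r).length - v.length) = [] := by
    rcases r with _ | ⟨y, ys⟩
    · simp [csInner]
    · have hf : (v ++ y :: ys).length - v.length = ys.length + 1 := by simp
      rw [hf]
      simp only [csInner, hgr]
      have hb := Hb (by simp)
      have hne : (y :: ys).getD 0 0 - (v ++ y :: ys).getD i 0 ≠ (v.length : Int) - (i : Int) := by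
        rw [hga i hi]
        simp only [List.getD_cons_zero] at *
        intro hc
        apply hb
        omega
      rw [if_pos hne]
  intro n
  induction n with
  | zero =>
    intro e hie hel hn
    have heq : e = v.length := by omega
    subst heq
    rw [hend, List.drop_eq_nil_of_le (by simp)]
    simp
  | succ n IH =>
    intro e hie hel hn
    rcases eq_or_lt_of_le hel with heq | hlt
    · subst heq
      rw [hend, List.drop_eq_nil_of_le (by simp)]
      simp
    · -- e < v.length : the loop body runs
      have hfuel : (v ++ r).length - e = ((v ++ r).length - (e+1)) + 1 := by
        have : e < (v ++ r).length := by simp only [List.length_append]; omega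
        omega
      rw [hfuel]
      simp only [csInner]
      have hcond : ¬ ((v ++ r).getD e 0 - (v ++ r).getD i 0 ≠ (e : Int) - (i : Int)) := by
        rw [hga e hlt, hga i hi]; simp
      rw [if_neg hcond]
      rw [IH (e+1) (by omega) (by omega) (by omega), hga e hlt, hga i hi]
      by_cases hyield : (e : Int) - (i : Int) ≥ minl - 1
      · have hse : i + (minl - 1).toNat ≤ e := by omega
        rw [if_pos hyield, max_eq_left hse, max_eq_left (by omega)]
        rw [show (List.range v.length).drop e = e :: (List.range v.length).drop (e+1) from by
          rw [List.drop_eq_getElem_cons (by simpa using hlt)]; simp]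
        simp [add_assoc]
      · have hse : e < i + (minl - 1).toNat := by omega
        rw [if_neg hyield, max_eq_right (by omega), max_eq_right (by omega)]
        simp

theorem flatMap_congr_mem {α β : Type} (l : List α) (f g : α → List β)
    (h : ∀ x ∈ l, f x = g x) : l.flatMap f = l.flatMap g := by
  induction l with
  | nil => rfl
  | cons y ys ih =>
    simp only [List.flatMap_cons]
    rw [h y (by simp), ih (fun x hx => h x (by simp [hx]))]

-- outer loop of A over any list = B's runs enumeration
theorem csMainAux (minl : Int) : ∀ (n : Nat) (a : List Int), a.length ≤ n →
    (List.range a.length).foldl (fun acc b => acc ++ csInner a b minl b (a.length - b)) []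
      = (csRuns a).flatMap (fun v => csEmit v minl) := by
  intro n
  induction n with
  | zero =>
    intro a ha
    have : a = [] := List.eq_nil_of_length_eq_zero (by omega)
    subst this
    simp [csRuns]
  | succ n IH =>
    intro a ha
    rcases a with _ | ⟨x, xs⟩
    · simp [csRuns]
    · rw [PySem.List.foldl_append_eq_flatMap, List.nil_append]
      set v : List Int := x :: csTake x xs with hv
      set r : List Int := csDrop x xs with hr
      have hsplit : x :: xs = v ++ r := by
        simp [hv, hr, csTake_append_csDrop]
      have hrlen : r.length ≤ n := by
        have h1 := csDrop_length_le xs x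
        simp only [List.length_cons] at ha
        simp only [hr]
        omega
      have Hv : ∀ k, k < v.length → v.getD k 0 = x + k := by
        intro k hk
        cases k with
        | zero => simp [hv]
        | succ k =>
          simp only [hv, List.getD_cons_succ]
          have hk' : k < (csTake x xs).length := by
            simp only [hv, List.length_cons] at hk; omega
          rw [csTake_getD xs x k hk']
          push_cast; ring
      have Hb : r ≠ [] → r.getD 0 0 ≠ x + v.length := by
        intro hne
        have h1 := csDrop_head_ne xs x (by simpa [hr] using hne)
        simp only [hv, List.length_cons]
        rw [← hr] at h1
        intro hc
        apply h1
        rw [hc]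
        push_cast; ring
      rw [hsplit]
      have hlen : (v ++ r).length = v.length + r.length := by simp
      rw [show List.range (v ++ r).length
            = List.range v.length ++ (List.range r.length).map (v.length + ·) from by
          rw [hlen, List.range_add]]
      rw [List.flatMap_append, List.flatMap_map]
      have hfirst : (List.range v.length).flatMap
          (fun b => csInner (v ++ r) b minl b ((v ++ r).length - b)) = csEmit v minl := by
        unfold csEmit
        apply flatMap_congr_mem
        intro i hi
        have hi' : i < v.length := List.mem_range.mp hi
        rw [csInner_run v r x minl Hv Hb i hi' (v.length - i) i (le_refl i)
          (le_of_lt hi') (le_refl _), max_eq_right (by omega)]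
        apply List.map_congr_left
        intro j hj
        have hj' : j < v.length := List.mem_range.mp (List.mem_of_mem_drop hj)
        rw [Hv i hi', Hv j hj']
      have hsecond : (List.range r.length).flatMap
          (fun b' => csInner (v ++ r) (v.length + b') minl (v.length + b')
            ((v ++ r).length - (v.length + b')))
          = (csRuns r).flatMap (fun w => csEmit w minl) := by
        rw [← IH r hrlen, PySem.List.foldl_append_eq_flatMap, List.nil_append]
        apply flatMap_congr_mem
        intro b' hb'
        have hfb : (v ++ r).length - (v.length + b') = r.length - b' := by
          simp only [List.length_append]; omega
        rw [hfb, csInner_shift]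
      rw [hfirst, hsecond]
      have hruns : csRuns (v ++ r) = v :: csRuns r := by
        rw [← hsplit, csRuns_cons, ← hv, ← hr]
      rw [hruns, List.flatMap_cons]

theorem csMain (minl : Int) (a : List Int) :
    (List.range a.length).foldl (fun acc b => acc ++ csInner a b minl b (a.length - b)) []
      = (csRuns a).flatMap (fun v => csEmit v minl) :=
  csMainAux minl a.length a (le_refl _)

-- ===== VERDICT (by name: the statement is the Claim_ definition above) =====
theorem create_straight_spec : Claim_equal_create_straight := by
  intro l minl _
  unfold Spec_create_straight create_straight create_straight_alt
  exact csMain minl _
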